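-- pv_equiv track=rewrite | github.com/Tanay-27/Data_Structures_and_Algorithms_Practise | gfgPractise/test.py | calcPosNTimes
-- ===== SOURCE A (Python) =====
-- def calcPosNTimes(times,k):
--     trackLen = 0
--     if times == -1:
--         while(k>0):
--             trackLen += k
--             k -= 1
--     else:
--         while(times > 0 and k>0):
--             trackLen += k
--             k -= 1
--             times -= 1
--
--     return trackLen
-- ===== SOURCE B (Python) =====
-- def calcPosNTimes(times, k):
--     # closed-form arithmetic sum of the descending run k, k-1, ..., k-n+1
--     if times == -1:
--         n = max(k, 0)
--     else:
--         n = max(min(times, k), 0)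
--     return n * k - n * (n - 1) // 2
-- ===== Notes on version B (the rewrite author's own statement) =====
-- stated objective: faster
-- what changed: Replaced the decrementing while-loops with the closed-form arithmetic-series sum n*k - n*(n-1)//2 where n is the number of terms (k, or min(times,k), clamped to 0).
import Mathlib
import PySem

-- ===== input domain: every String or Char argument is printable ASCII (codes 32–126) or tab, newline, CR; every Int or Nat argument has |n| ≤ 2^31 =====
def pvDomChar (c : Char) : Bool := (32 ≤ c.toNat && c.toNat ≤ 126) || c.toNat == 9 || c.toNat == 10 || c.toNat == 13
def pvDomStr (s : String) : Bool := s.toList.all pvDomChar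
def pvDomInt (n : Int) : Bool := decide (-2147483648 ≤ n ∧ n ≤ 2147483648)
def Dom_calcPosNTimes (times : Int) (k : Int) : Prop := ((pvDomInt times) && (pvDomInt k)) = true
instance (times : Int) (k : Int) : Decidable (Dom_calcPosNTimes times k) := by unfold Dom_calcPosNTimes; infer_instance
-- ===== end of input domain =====

-- B replaces A's decrementing while-loops by the closed-form arithmetic-series sum (objective: faster, O(1) vs O(min(times,k))).

-- ===== PORT A =====
-- the 'times == -1' while-loop: trackLen += k; k -= 1, while k > 0
def pvLoopAll (k trackLen : Int) : Int :=
  if 0 < k then pvLoopAll (k - 1) (trackLen + k) else trackLen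
  termination_by k.toNat
  decreasing_by omega

-- the other while-loop: trackLen += k; k -= 1; times -= 1, while times > 0 and k > 0
def pvLoopN (times k trackLen : Int) : Int :=
  if 0 < times ∧ 0 < k then pvLoopN (times - 1) (k - 1) (trackLen + k) else trackLen
  termination_by k.toNat
  decreasing_by omega

def calcPosNTimes (times : Int) (k : Int) : Int :=
  if times = -1 then pvLoopAll k 0 else pvLoopN times k 0

-- ===== PORT B =====
def calcPosNTimes_alt (times : Int) (k : Int) : Int :=
  let n := if times = -1 then max k 0 else max (min times k) 0
  n * k - PySem.Int.floordiv (n * (n - 1)) 2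

-- ===== PRECONDITION & SPEC =====
def Spec_calcPosNTimes (times : Int) (k : Int) (out : Int) : Prop := out = calcPosNTimes_alt times k
instance (times : Int) (k : Int) (out : Int) : Decidable (Spec_calcPosNTimes times k out) := by unfold Spec_calcPosNTimes; infer_instance

-- ===== CLAIM (what is proved, stated in full; the proofs are below) =====
def Claim_equal_calcPosNTimes : Prop := ∀ (times : Int) (k : Int), Dom_calcPosNTimes times k → Spec_calcPosNTimes times k (calcPosNTimes times k)

-- ===== LEMMAS AND PROOFS =====

-- n*(n-1) is even, so Python's floor division by 2 is exact
theorem pvFd2 (n : Int) : 2 * PySem.Int.floordiv (n * (n - 1)) 2 = n * (n - 1) := by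
  rw [PySem.Int.floordiv_eq_ediv_of_pos (by omega)]
  have h : (2 : Int) ∣ n * (n - 1) := by
    rcases Int.even_or_odd n with h | h
    · exact Dvd.dvd.mul_right h.two_dvd _
    · obtain ⟨m, hm⟩ := h
      exact ⟨2 * m * m + m, by rw [hm]; ring⟩
  exact Int.mul_ediv_cancel' h

theorem pvLoopAll_eq (k trackLen : Int) :
    pvLoopAll k trackLen = trackLen + (max k 0) * k - PySem.Int.floordiv ((max k 0) * (max k 0 - 1)) 2 := by
  unfold pvLoopAll
  split
  · next h =>
    rw [pvLoopAll_eq (k - 1) (trackLen + k)]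
    have h1 := pvFd2 (max (k - 1) 0)
    have h2 := pvFd2 (max k 0)
    have e1 : max (k - 1) 0 = k - 1 := by omega
    have e2 : max k 0 = k := by omega
    rw [e1] at h1 ⊢; rw [e2] at h2 ⊢
    ring_nf at h1 h2 ⊢
    linarith
  · next h =>
    have e : max k 0 = 0 := by omega
    simp [e, PySem.Int.floordiv]
  termination_by k.toNat
  decreasing_by omega

theorem pvLoopN_eq (times k trackLen : Int) :
    pvLoopN times k trackLen = trackLen + (max (min times k) 0) * k
      - PySem.Int.floordiv ((max (min times k) 0) * (max (min times k) 0 - 1)) 2 := by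
  unfold pvLoopN
  split
  · next h =>
    rw [pvLoopN_eq (times - 1) (k - 1) (trackLen + k)]
    have h1 := pvFd2 (max (min (times - 1) (k - 1)) 0)
    have h2 := pvFd2 (max (min times k) 0)
    have e1 : max (min (times - 1) (k - 1)) 0 = min times k - 1 := by omega
    have e2 : max (min times k) 0 = min times k := by omega
    rw [e1] at h1 ⊢; rw [e2] at h2 ⊢
    set n := min times k with hn
    have hk : 0 < k := h.2
    ring_nf at h1 h2 ⊢
    linarith
  · next h =>
    have e : max (min times k) 0 = 0 := by omega
    simp [e, PySem.Int.floordiv]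
  termination_by k.toNat
  decreasing_by omega

-- ===== VERDICT (by name: the statement is the Claim_ definition above) =====
theorem calcPosNTimes_spec : Claim_equal_calcPosNTimes := by
  intro times k _
  unfold Spec_calcPosNTimes calcPosNTimes calcPosNTimes_alt
  by_cases h : times = -1 <;> simp [h, pvLoopAll_eq, pvLoopN_eq]
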